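-- pv_equiv track=rewrite | github.com/HarryLiu2003/Navi_CFCI | services/sprint1_deprecated/app/services/keywords.py | get_context_batch
-- ===== SOURCE A (Python) =====
-- def get_context_batch(text: str, phrases: list, window_size: int = 3) -> dict:
--     """Get context for multiple phrases in a single text scan"""
--     lines = text.splitlines()
--     contexts = {phrase: [] for phrase in phrases}
--
--     for i, line in enumerate(lines):
--         line_lower = line.lower()  # Convert once for case-insensitive matching
--         for phrase in phrases:
--             if phrase.lower() in line_lower:
--                 start_idx = max(0, i - window_size)
--                 end_idx = min(len(lines), i + window_size + 1)
--                 contexts[phrase].append("\n".join(lines[start_idx:end_idx]))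
--
--     return contexts
-- ===== SOURCE B (Python) =====
-- def _line_hits(low, by_first, empties):
--     """Phrases occurring in this lowered line, found by one left-to-right scan:
--     at each position only the phrases whose first character matches are tried."""
--     hit = set(empties)
--     for j, ch in enumerate(low):
--         for pl, p in by_first.get(ch, ()):
--             if low.startswith(pl, j):
--                 hit.add(p)
--     return hit
--
--
-- def get_context_batch(text: str, phrases: list, window_size: int = 3) -> dict:
--     """Multi-pattern scan: bucket lowered phrases by first character, walk each
--     lowered line once trying only the bucket of the current character, record
--     matched line numbers, and build window strings only for matched lines."""
--     lines = text.splitlines()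
--     n = len(lines)
--     by_first = {}
--     empties = []
--     for p in phrases:
--         pl = p.lower()
--         if pl:
--             by_first.setdefault(pl[0], []).append((pl, p))
--         else:
--             empties.append(p)
--     matched = {p: [] for p in phrases}
--     for i, line in enumerate(lines):
--         for p in _line_hits(line.lower(), by_first, empties):
--             matched[p].append(i)
--
--     def _window(i):
--         return "\n".join(lines[max(0, i - window_size):min(n, i + window_size + 1)])
--
--     return {p: [_window(i) for i in matched[p]] for p in phrases}
-- ===== Notes on version B (the rewrite author's own statement) =====
-- stated objective: alternative
-- what changed: B replaces A's per-line per-phrase substring tests by a multi-pattern scan: lowered phrases are bucketed in a dict keyed by their first character, each lowered line is walked position by position trying only the current character's bucket, matched line numbers are recorded in a set per line, and window strings are built only for the matched lines at the end.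
-- outside the precondition, e.g. on get_context_batch('a\nb', ['a', 'a'], 1): A returns {'a': ['a\nb', 'a\nb']}, B returns {'a': ['a\nb']}
import Mathlib
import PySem

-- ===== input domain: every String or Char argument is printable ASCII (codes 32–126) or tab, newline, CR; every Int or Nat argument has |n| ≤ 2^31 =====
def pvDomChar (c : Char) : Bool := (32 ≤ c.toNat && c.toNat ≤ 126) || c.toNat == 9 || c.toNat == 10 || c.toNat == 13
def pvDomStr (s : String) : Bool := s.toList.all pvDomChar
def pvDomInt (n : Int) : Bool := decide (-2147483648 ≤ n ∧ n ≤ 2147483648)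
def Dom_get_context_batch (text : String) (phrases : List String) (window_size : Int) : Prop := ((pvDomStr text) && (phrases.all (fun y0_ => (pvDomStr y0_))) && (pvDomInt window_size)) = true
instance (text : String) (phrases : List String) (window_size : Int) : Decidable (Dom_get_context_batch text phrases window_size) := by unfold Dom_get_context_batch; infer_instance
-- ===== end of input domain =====

-- B replaces A's per-line per-phrase substring tests by a multi-pattern scan: phrases are bucketed
-- by first character, each lowered line is walked once trying only the current character's bucket,
-- and window strings are built only for matched lines; an alternative algorithm of similar cost.


-- ===== PORT A =====
def get_context_batch (text : String) (phrases : List String) (window_size : Int) : List (String × List String) :=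
  let lines := PySem.Str.splitlines text
  let contexts : PySem.Dict String (List String) :=
    phrases.foldl (fun d phrase => d.insert phrase []) PySem.Dict.empty
  let final :=
    (PySem.List.enumerate lines).foldl (fun d il =>
      let line_lower := PySem.Str.lower il.2
      phrases.foldl (fun d phrase =>
        if PySem.Str.isIn (PySem.Str.lower phrase) line_lower then
          d.modify phrase []
            (· ++ [PySem.Str.join "\n"
              (PySem.List.slice lines (some (max 0 (il.1 - window_size)))
                (some (min (lines.length : Int) (il.1 + window_size + 1))))])
        else d) d) contexts
  final.items

-- ===== PORT B =====
-- low.startswith(pl, j): exact for the 0 ≤ j < len(low) produced by enumerate — prefix of low[j:]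
def pvLineHits (low : List Char) (byFirst : PySem.Dict Char (List (List Char × String)))
    (empties : List String) : PySem.Set String :=
  (PySem.List.enumerate low).foldl (fun hit jc =>
    (byFirst.getD jc.2 []).foldl (fun hit plp =>
      if PySem.Chars.startswith (low.drop jc.1.toNat) plp.1 then PySem.Set.add hit plp.2 else hit)
      hit)
    (PySem.Set.ofList empties)

def get_context_batch_alt (text : String) (phrases : List String) (window_size : Int) : List (String × List String) :=
  let lines := PySem.Str.splitlines text
  let n : Int := lines.length
  let init :=
    phrases.foldl (fun st p =>
      let pl := PySem.Chars.lower p.toList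
      match pl with
      | [] => (st.1, st.2 ++ [p])
      | c :: _ => (st.1.modify c [] (· ++ [(pl, p)]), st.2))
      ((PySem.Dict.empty : PySem.Dict Char (List (List Char × String))), ([] : List String))
  let matched0 : PySem.Dict String (List Int) :=
    phrases.foldl (fun d p => d.insert p []) PySem.Dict.empty
  let matched :=
    (PySem.List.enumerate lines).foldl (fun d il =>
      (pvLineHits (PySem.Chars.lower il.2.toList) init.1 init.2).foldl
        (fun d p => d.modify p [] (· ++ [il.1])) d) matched0
  (phrases.foldl (fun d p =>
      d.insert p ((matched.getD p []).map (fun i =>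
        PySem.Str.join "\n"
          (PySem.List.slice lines (some (max 0 (i - window_size)))
            (some (min n (i + window_size + 1)))))))
    PySem.Dict.empty).items

-- ===== PRECONDITION & SPEC =====
-- Pre_ excludes only phrase lists in which some duplicated phrase occurs (case-insensitively) in a
-- line of the text: a duplicated phrase is a duplicate dict key, an accidental corner on which A
-- appends each matching window once per list occurrence of the phrase while keeping a single key.
def Pre_get_context_batch (text : String) (phrases : List String) (window_size : Int) : Prop :=
  ∀ p ∈ phrases, phrases.count p ≤ 1 ∨
    ∀ line ∈ PySem.Str.splitlines text,
      PySem.Str.isIn (PySem.Str.lower p) (PySem.Str.lower line) = false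
instance (text : String) (phrases : List String) (window_size : Int) : Decidable (Pre_get_context_batch text phrases window_size) := by unfold Pre_get_context_batch; infer_instance

def pvWitness_get_context_batch : String × List String × Int := ("Alpha\nbeta\ngamma", ["beta", "ALPHA"], 1)

def Spec_get_context_batch (text : String) (phrases : List String) (window_size : Int) (out : List (String × List String)) : Prop := out = get_context_batch_alt text phrases window_size
instance (text : String) (phrases : List String) (window_size : Int) (out : List (String × List String)) : Decidable (Spec_get_context_batch text phrases window_size out) := by unfold Spec_get_context_batch; infer_instance

-- ===== CLAIM (what is proved, stated in full; the proofs are below) =====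
def Claim_equal_get_context_batch : Prop := ∀ (text : String) (phrases : List String) (window_size : Int), Dom_get_context_batch text phrases window_size → Pre_get_context_batch text phrases window_size → Spec_get_context_batch text phrases window_size (get_context_batch text phrases window_size)

-- ===== LEMMAS AND PROOFS =====

-- ---- A-side: characterize A's dict loops ----

theorem pv_init_getD (ps : List String) :
    ∀ (d : PySem.Dict String (List String)), (∀ q, d.getD q [] = []) →
    ∀ q, (ps.foldl (fun d p => d.insert p ([] : List String)) d).getD q [] = [] := by
  induction ps with
  | nil => intro d h q; exact h q
  | cons p t ih =>
    intro d h q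
    simp only [List.foldl_cons]
    refine ih _ (fun r => ?_) q
    rw [PySem.Dict.getD_insert]
    split <;> [rfl; exact h r]

theorem pv_init_keys (ps : List String) :
    (ps.foldl (fun d p => d.insert p ([] : List String)) PySem.Dict.empty).keys
      = PySem.List.dedup ps := by
  rw [PySem.Dict.keys_foldl_insert]
  simp [PySem.Set.update, PySem.Set.ofList_eq_foldl, PySem.Dict.keys_empty]

theorem pv_inner_getD (w : String) (c : String → Bool) :
    ∀ (ps : List String) (d : PySem.Dict String (List String)) (q : String),
    (ps.foldl (fun d p => if c p then d.modify p [] (· ++ [w]) else d) d).getD q []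
      = d.getD q [] ++ (if c q = true then List.replicate (ps.count q) w else []) := by
  intro ps
  induction ps with
  | nil => intro d q; by_cases h : c q = true <;> simp [h]
  | cons p t ih =>
    intro d q
    simp only [List.foldl_cons]
    by_cases hcp : c p = true
    · rw [if_pos hcp, ih]
      rw [PySem.Dict.getD_modify]
      by_cases hq : q = p
      · subst hq
        simp only [if_pos hcp, List.count_cons_self, List.replicate_succ]
        simp [List.append_assoc]
      · rw [if_neg hq]; simp [List.count_cons, Ne.symm hq]
    · rw [if_neg hcp, ih]
      by_cases hq : q = p
      · subst hq; simp [hcp]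
      · simp [List.count_cons, Ne.symm hq]

theorem pv_inner_keys (c : String → Bool) (w : String) :
    ∀ (ps : List String) (d : PySem.Dict String (List String)),
    (∀ p ∈ ps, p ∈ d.keys) →
    (ps.foldl (fun d p => if c p then d.modify p [] (· ++ [w]) else d) d).keys = d.keys := by
  intro ps
  induction ps with
  | nil => intro d _; simp
  | cons p t ih =>
    intro d h
    simp only [List.foldl_cons]
    by_cases hcp : c p = true
    · rw [if_pos hcp]
      have hk : (d.modify p [] (· ++ [w])).keys = d.keys := by
        rw [PySem.Dict.keys_modify, PySem.Dict.keys_insert_of_contains]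
        rw [PySem.Dict.contains_iff_mem_keys]
        exact h p (List.mem_cons_self ..)
      rw [ih _ (by intro x hx; rw [hk]; exact h x (List.mem_cons_of_mem _ hx)), hk]
    · rw [if_neg hcp]
      exact ih _ (fun x hx => h x (List.mem_cons_of_mem _ hx))

theorem pv_outer (phrases : List String)
    (c : String → Int × String → Bool) (w : Int × String → String) :
    ∀ (L : List (Int × String)) (d : PySem.Dict String (List String)),
    (∀ p ∈ phrases, p ∈ d.keys) →
    (L.foldl (fun d il =>
        phrases.foldl (fun d p => if c p il then d.modify p [] (· ++ [w il]) else d) d) d).keys = d.keys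
    ∧ ∀ q, (L.foldl (fun d il =>
        phrases.foldl (fun d p => if c p il then d.modify p [] (· ++ [w il]) else d) d) d).getD q []
      = d.getD q [] ++ (L.filter (fun il => c q il)).flatMap
          (fun il => List.replicate (phrases.count q) (w il)) := by
  intro L
  induction L with
  | nil => intro d hk; exact ⟨rfl, by simp⟩
  | cons il t ih =>
    intro d hmem
    simp only [List.foldl_cons]
    set d' := phrases.foldl (fun d p => if c p il then d.modify p [] (· ++ [w il]) else d) d with hd'
    have hk' : d'.keys = d.keys := pv_inner_keys _ _ _ _ hmem
    obtain ⟨ihk, ihg⟩ := ih d' (by rw [hk']; exact hmem)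
    refine ⟨by rw [ihk, hk'], ?_⟩
    intro q
    rw [ihg q, hd', pv_inner_getD]
    by_cases hc : c q il = true
    · simp [hc, List.filter_cons, List.append_assoc]
    · simp [hc, List.filter_cons]

theorem pv_flatMap_single {α β : Type} (f : α → β) :
    ∀ (l : List α), l.flatMap (fun x => [f x]) = l.map f := by
  intro l; induction l with
  | nil => rfl
  | cons x t ih => simp [List.flatMap_cons, ih]

-- ---- B-side: the bucket index ----

-- the per-phrase step building (by_first, empties)
theorem pv_buckets (ps : List String) :
    ∀ (st : PySem.Dict Char (List (List Char × String)) × List String),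
    (∀ ch, (ps.foldl (fun st p =>
        match PySem.Chars.lower p.toList with
        | [] => (st.1, st.2 ++ [p])
        | c :: _ => (st.1.modify c [] (· ++ [(PySem.Chars.lower p.toList, p)]), st.2)) st).1.getD ch []
      = st.1.getD ch [] ++ (ps.filter (fun p => (PySem.Chars.lower p.toList).head? == some ch)).map
          (fun p => (PySem.Chars.lower p.toList, p)))
    ∧ (ps.foldl (fun st p =>
        match PySem.Chars.lower p.toList with
        | [] => (st.1, st.2 ++ [p])
        | c :: _ => (st.1.modify c [] (· ++ [(PySem.Chars.lower p.toList, p)]), st.2)) st).2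
      = st.2 ++ ps.filter (fun p => (PySem.Chars.lower p.toList).isEmpty) := by
  induction ps with
  | nil => intro st; simp
  | cons p t ih =>
    intro st
    simp only [List.foldl_cons, List.filter_cons]
    rcases hpl : PySem.Chars.lower p.toList with _ | ⟨c, rest⟩
    · simp only [hpl]
      obtain ⟨ih1, ih2⟩ := ih (st.1, st.2 ++ [p])
      refine ⟨fun ch => ?_, ?_⟩
      · rw [ih1 ch]; simp [hpl]
      · rw [ih2]; simp [hpl]
    · simp only [hpl]
      obtain ⟨ih1, ih2⟩ := ih (st.1.modify c [] (· ++ [(c :: rest, p)]), st.2)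
      refine ⟨fun ch => ?_, ?_⟩
      · rw [ih1 ch]
        rw [PySem.Dict.getD_modify]
        by_cases hc : ch = c
        · subst hc; simp [hpl]
        · rw [if_neg hc]
          simp only [hpl, List.head?_cons]
          have : (some c == some ch) = false := by simpa using fun h => hc h.symm
          simp [this]
      · rw [ih2]; simp [hpl]

-- membership in the nested hit-set fold
theorem pv_add_if_mem {β : Type} (f : β → String) (c : β → Bool) (q : String) :
    ∀ (l : List β) (s : PySem.Set String),
    (q ∈ l.foldl (fun s b => if c b then PySem.Set.add s (f b) else s) s
      ↔ q ∈ s ∨ ∃ b ∈ l, c b = true ∧ q = f b) := by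
  intro l
  induction l with
  | nil => intro s; simp
  | cons b t ih =>
    intro s
    simp only [List.foldl_cons]
    by_cases hb : c b = true
    · rw [if_pos hb, ih]
      rw [PySem.Set.mem_add]
      constructor
      · rintro (⟨h | h⟩ | h)
        · exact Or.inl h
        · exact Or.inr ⟨b, List.mem_cons_self .., hb, h⟩
        · obtain ⟨x, hx, hcx, hq⟩ := h; exact Or.inr ⟨x, List.mem_cons_of_mem _ hx, hcx, hq⟩
      · rintro (h | ⟨x, hx, hcx, hq⟩)
        · exact Or.inl (Or.inl h)
        · rcases List.mem_cons.mp hx with rfl | hx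
          · exact Or.inl (Or.inr hq)
          · exact Or.inr ⟨x, hx, hcx, hq⟩
    · rw [if_neg hb, ih]
      constructor
      · rintro (h | ⟨x, hx, hcx, hq⟩)
        · exact Or.inl h
        · exact Or.inr ⟨x, List.mem_cons_of_mem _ hx, hcx, hq⟩
      · rintro (h | ⟨x, hx, hcx, hq⟩)
        · exact Or.inl h
        · rcases List.mem_cons.mp hx with rfl | hx
          · exact absurd hcx hb
          · exact Or.inr ⟨x, hx, hcx, hq⟩

theorem pv_scan_mem (byF : PySem.Dict Char (List (List Char × String))) (low : List Char)
    (q : String) :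
    ∀ (L : List (Int × Char)) (s : PySem.Set String),
    (q ∈ L.foldl (fun hit jc =>
        (byF.getD jc.2 []).foldl (fun hit plp =>
          if PySem.Chars.startswith (low.drop jc.1.toNat) plp.1 then PySem.Set.add hit plp.2 else hit)
          hit) s
      ↔ q ∈ s ∨ ∃ jc ∈ L, ∃ plp ∈ byF.getD jc.2 [],
          PySem.Chars.startswith (low.drop jc.1.toNat) plp.1 = true ∧ q = plp.2) := by
  intro L
  induction L with
  | nil => intro s; simp
  | cons jc t ih =>
    intro s
    simp only [List.foldl_cons]
    rw [ih, pv_add_if_mem (fun plp => plp.2) (fun plp => PySem.Chars.startswith (low.drop jc.1.toNat) plp.1) q (byF.getD jc.2 []) s]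
    constructor
    · rintro (h | h)
      · rcases h with h | ⟨x, hx, hcx, hq⟩
        · exact Or.inl h
        · exact Or.inr ⟨jc, List.mem_cons_self .., x, hx, hcx, hq⟩
      · obtain ⟨il, hil, x, hx, hcx, hq⟩ := h
        exact Or.inr ⟨il, List.mem_cons_of_mem _ hil, x, hx, hcx, hq⟩
    · rintro (h | ⟨il, hil, x, hx, hcx, hq⟩)
      · exact Or.inl (Or.inl h)
      · rcases List.mem_cons.mp hil with rfl | hil
        · exact Or.inl (Or.inr ⟨x, hx, hcx, hq⟩)
        · exact Or.inr ⟨il, hil, x, hx, hcx, hq⟩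

theorem pv_nodup_foldl {β : Type} (g : PySem.Set String → β → PySem.Set String)
    (hg : ∀ s b, s.Nodup → (g s b).Nodup) :
    ∀ (l : List β) (s : PySem.Set String), s.Nodup → (l.foldl g s).Nodup := by
  intro l
  induction l with
  | nil => intro s h; exact h
  | cons b t ih => intro s h; exact ih _ (hg s b h)

theorem pv_scan_nodup (byF : PySem.Dict Char (List (List Char × String))) (low : List Char) :
    ∀ (L : List (Int × Char)) (s : PySem.Set String), s.Nodup →
    (L.foldl (fun hit jc =>
        (byF.getD jc.2 []).foldl (fun hit plp =>
          if PySem.Chars.startswith (low.drop jc.1.toNat) plp.1 then PySem.Set.add hit plp.2 else hit)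
          hit) s).Nodup := by
  intro L s h
  refine pv_nodup_foldl _ (fun s jc hs => ?_) L s h
  refine pv_nodup_foldl _ (fun s plp hs => ?_) _ s hs
  split
  · exact PySem.Set.nodup_add _ _ hs
  · exact hs

-- ---- B-side: the marking and output loops ----

theorem pv_mark_getD (i : Int) :
    ∀ (hs : List String), hs.Nodup → ∀ (d : PySem.Dict String (List Int)) (q : String),
    (hs.foldl (fun d p => d.modify p [] (· ++ [i])) d).getD q []
      = d.getD q [] ++ (if q ∈ hs then [i] else []) := by
  intro hs
  induction hs with
  | nil => intro _ d q; simp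
  | cons p t ih =>
    intro hnd d q
    simp only [List.foldl_cons]
    rw [ih (List.Nodup.of_cons hnd), PySem.Dict.getD_modify]
    by_cases hq : q = p
    · subst hq
      have : q ∉ t := (List.nodup_cons.mp hnd).1
      simp [this]
    · rw [if_neg hq]
      by_cases hqt : q ∈ t <;> simp [hqt, hq]

theorem pv_mark_keys (i : Int) :
    ∀ (hs : List String) (d : PySem.Dict String (List Int)),
    (∀ p ∈ hs, p ∈ d.keys) →
    (hs.foldl (fun d p => d.modify p [] (· ++ [i])) d).keys = d.keys := by
  intro hs
  induction hs with
  | nil => intro d _; simp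
  | cons p t ih =>
    intro d h
    simp only [List.foldl_cons]
    have hk : (d.modify p [] (· ++ [i])).keys = d.keys := by
      rw [PySem.Dict.keys_modify, PySem.Dict.keys_insert_of_contains]
      rw [PySem.Dict.contains_iff_mem_keys]
      exact h p (List.mem_cons_self ..)
    rw [ih _ (by intro x hx; rw [hk]; exact h x (List.mem_cons_of_mem _ hx)), hk]

theorem pv_init_getD' (ps : List String) :
    ∀ (d : PySem.Dict String (List Int)), (∀ q, d.getD q [] = []) →
    ∀ q, (ps.foldl (fun d p => d.insert p ([] : List Int)) d).getD q [] = [] := by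
  induction ps with
  | nil => intro d h q; exact h q
  | cons p t ih =>
    intro d h q
    simp only [List.foldl_cons]
    refine ih _ (fun r => ?_) q
    rw [PySem.Dict.getD_insert]
    split <;> [rfl; exact h r]

theorem pv_init_keys' (ps : List String) :
    (ps.foldl (fun d p => d.insert p ([] : List Int)) PySem.Dict.empty).keys
      = PySem.List.dedup ps := by
  rw [PySem.Dict.keys_foldl_insert]
  simp [PySem.Set.update, PySem.Set.ofList_eq_foldl, PySem.Dict.keys_empty]

theorem pv_outerB (H : Int × String → List String) (hnd : ∀ il, (H il).Nodup)
    (phrases : List String) (hsub : ∀ il q, q ∈ H il → q ∈ phrases) :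
    ∀ (L : List (Int × String)) (d : PySem.Dict String (List Int)),
    (∀ p ∈ phrases, p ∈ d.keys) →
    (L.foldl (fun d il => (H il).foldl (fun d p => d.modify p [] (· ++ [il.1])) d) d).keys = d.keys
    ∧ ∀ q, (L.foldl (fun d il => (H il).foldl (fun d p => d.modify p [] (· ++ [il.1])) d) d).getD q []
      = d.getD q [] ++ (L.filter (fun il => decide (q ∈ H il))).map (·.1) := by
  intro L
  induction L with
  | nil => intro d hk; exact ⟨rfl, by simp⟩
  | cons il t ih =>
    intro d hmem
    simp only [List.foldl_cons]
    set d' := (H il).foldl (fun d p => d.modify p [] (· ++ [il.1])) d with hd'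
    have hk' : d'.keys = d.keys :=
      pv_mark_keys _ _ _ (fun p hp => hmem p (hsub il p hp))
    obtain ⟨ihk, ihg⟩ := ih d' (by rw [hk']; exact hmem)
    refine ⟨by rw [ihk, hk'], ?_⟩
    intro q
    rw [ihg q, hd', pv_mark_getD il.1 _ (hnd il)]
    by_cases hq : q ∈ H il
    · simp [hq, List.filter_cons, List.append_assoc]
    · simp [hq, List.filter_cons]

theorem pv_comp_getD (f : String → List String) :
    ∀ (ps : List String) (d : PySem.Dict String (List String)) (q : String),
    (ps.foldl (fun d p => d.insert p (f p)) d).getD q []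
      = if q ∈ ps then f q else d.getD q [] := by
  intro ps
  induction ps with
  | nil => intro d q; simp
  | cons p t ih =>
    intro d q
    simp only [List.foldl_cons]
    rw [ih]
    by_cases hqt : q ∈ t
    · simp [hqt]
    · rw [if_neg hqt, PySem.Dict.getD_insert]
      by_cases hq : q = p
      · subst hq; simp [hqt]
      · simp [hq, hqt]

theorem pv_comp_items (f : String → List String) (ps : List String) :
    (ps.foldl (fun d p => d.insert p (f p)) PySem.Dict.empty).items
      = (PySem.List.dedup ps).map (fun p => (p, f p)) := by
  have hkeys : (ps.foldl (fun d p => d.insert p (f p)) PySem.Dict.empty).keys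
      = PySem.List.dedup ps := by
    rw [PySem.Dict.keys_foldl_insert]
    simp [PySem.Set.update, PySem.Set.ofList_eq_foldl, PySem.Dict.keys_empty]
  have hnd : (ps.foldl (fun d p => d.insert p (f p)) PySem.Dict.empty).keys.Nodup := by
    rw [hkeys]; exact PySem.List.nodup_dedup ps
  rw [PySem.Dict.items_eq_map_keys _ hnd [], hkeys]
  apply List.map_congr_left
  intro q hq
  rw [pv_comp_getD, if_pos ((PySem.List.mem_dedup _ _).mp hq)]

-- ---- hit set = case-insensitive membership ----

theorem pv_hits_iff (phrases : List String) (low : List Char) (q : String) :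
    (q ∈ pvLineHits low
        (phrases.foldl (fun st p =>
          match PySem.Chars.lower p.toList with
          | [] => (st.1, st.2 ++ [p])
          | c :: _ => (st.1.modify c [] (· ++ [(PySem.Chars.lower p.toList, p)]), st.2))
          ((PySem.Dict.empty : PySem.Dict Char (List (List Char × String))), ([] : List String))).1
        (phrases.foldl (fun st p =>
          match PySem.Chars.lower p.toList with
          | [] => (st.1, st.2 ++ [p])
          | c :: _ => (st.1.modify c [] (· ++ [(PySem.Chars.lower p.toList, p)]), st.2))
          ((PySem.Dict.empty : PySem.Dict Char (List (List Char × String))), ([] : List String))).2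
      ↔ q ∈ phrases ∧ PySem.Chars.isIn (PySem.Chars.lower q.toList) low = true) := by
  obtain ⟨hB1, hB2⟩ := pv_buckets phrases
      ((PySem.Dict.empty : PySem.Dict Char (List (List Char × String))), ([] : List String))
  unfold pvLineHits
  rw [pv_scan_mem, hB2]
  simp only [PySem.Set.mem_ofList, List.nil_append]
  constructor
  · rintro (hemp | ⟨jc, hjc, plp, hplp, hsw, rfl⟩)
    · obtain ⟨hq, he⟩ := List.mem_filter.mp hemp
      refine ⟨hq, ?_⟩
      have he' : PySem.Chars.lower q.toList = [] := List.isEmpty_iff.mp he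
      rw [he']
      exact PySem.Chars.isIn_nil low
    · rw [hB1 jc.2] at hplp
      rw [PySem.Dict.getD_empty, List.nil_append] at hplp
      obtain ⟨p, hpf, hpe⟩ := List.mem_map.mp hplp
      obtain ⟨hp, _⟩ := List.mem_filter.mp hpf
      have hq : plp.2 = p := by rw [← hpe]
      have hl : plp.1 = PySem.Chars.lower p.toList := by rw [← hpe]
      subst hq
      refine ⟨hp, ?_⟩
      rw [← PySem.Chars.exists_prefix_drop_iff_isIn]
      exact ⟨jc.1.toNat, hl ▸ (PySem.Chars.startswith_iff _ _).mp hsw⟩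
  · rintro ⟨hq, hin⟩
    rcases hlow : PySem.Chars.lower q.toList with _ | ⟨c, rest⟩
    · left
      exact List.mem_filter.mpr ⟨hq, by simp [hlow]⟩
    · right
      rw [hlow] at hin
      obtain ⟨j, hj⟩ := (PySem.Chars.exists_prefix_drop_iff_isIn _ _).mpr hin
      obtain ⟨tail, htail⟩ := hj
      have hjlt : j < low.length := by
        by_contra hge
        have : low.drop j = [] := List.drop_eq_nil_of_le (by omega)
        rw [this] at htail
        simp at htail
      have hgetc : low[j] = c := by
        have h0 : (low.drop j)[0]? = some c := by rw [← htail]; simp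
        rw [List.getElem?_drop, Nat.add_zero] at h0
        have := List.getElem?_eq_getElem hjlt
        rw [this] at h0
        exact (Option.some.injEq _ _).mp h0
      refine ⟨((j : Int), low[j]), ?_, (c :: rest, q), ?_, ?_, rfl⟩
      · rw [PySem.List.mem_enumerate_iff]
        exact ⟨j, hjlt, by simp⟩
      · rw [hB1, PySem.Dict.getD_empty, List.nil_append]
        refine List.mem_map.mpr ⟨q, List.mem_filter.mpr ⟨hq, ?_⟩, by rw [hlow]⟩
        simp [hlow, hgetc]
      · rw [PySem.Chars.startswith_iff]
        simp only [Int.toNat_natCast]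
        exact ⟨tail, htail⟩

-- ---- the common canonical form ----

theorem pv_mainA (text : String) (phrases : List String) (window_size : Int)
    (hpre : Pre_get_context_batch text phrases window_size) :
    get_context_batch text phrases window_size
      = (PySem.List.dedup phrases).map (fun q => (q,
          ((PySem.List.enumerate (PySem.Str.splitlines text)).filter (fun il =>
              PySem.Str.isIn (PySem.Str.lower q) (PySem.Str.lower il.2))).map (fun il =>
            PySem.Str.join "\n"
              (PySem.List.slice (PySem.Str.splitlines text)
                (some (max 0 (il.1 - window_size)))
                (some (min ((PySem.Str.splitlines text).length : Int) (il.1 + window_size + 1))))))) := by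
  unfold get_context_batch
  simp only []
  set lines := PySem.Str.splitlines text with hlines
  set win : Int → String := fun i =>
    PySem.Str.join "\n"
      (PySem.List.slice lines (some (max 0 (i - window_size)))
        (some (min (lines.length : Int) (i + window_size + 1)))) with hwin
  set c : String → Int × String → Bool :=
    fun p il => PySem.Str.isIn (PySem.Str.lower p) (PySem.Str.lower il.2) with hc
  set d0 := phrases.foldl (fun d phrase => d.insert phrase ([] : List String)) PySem.Dict.empty with hd0
  have hkeys0 : d0.keys = PySem.List.dedup phrases := pv_init_keys phrases
  have hg0 : ∀ q, d0.getD q [] = [] :=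
    pv_init_getD phrases PySem.Dict.empty (fun q => PySem.Dict.getD_empty q [])
  obtain ⟨hk, hg⟩ := pv_outer phrases c (fun il => win il.1) (PySem.List.enumerate lines) d0
    (by intro p hp; rw [hkeys0]; exact (PySem.List.mem_dedup _ _).mpr hp)
  have hkeynd : ((PySem.List.enumerate lines).foldl (fun d il =>
      phrases.foldl (fun d p => if c p il then d.modify p [] (· ++ [win il.1]) else d) d) d0).keys.Nodup := by
    rw [hk, hkeys0]; exact PySem.List.nodup_dedup phrases
  rw [PySem.Dict.items_eq_map_keys _ hkeynd [], hk, hkeys0]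
  apply List.map_congr_left
  intro q hq
  have hqm : q ∈ phrases := (PySem.List.mem_dedup _ _).mp hq
  rw [hg q, hg0 q, List.nil_append]
  refine Prod.ext rfl ?_
  simp only []
  rcases hpre q hqm with hcount | hfail
  · have h1 : phrases.count q = 1 :=
      le_antisymm hcount (List.count_pos_iff.mpr hqm)
    rw [h1]
    simp only [List.replicate_one]
    rw [pv_flatMap_single]
  · have hnil : List.filter (fun il => PySem.Str.isIn (PySem.Str.lower q) (PySem.Str.lower il.2))
        (PySem.List.enumerate lines) = [] := by
      apply List.filter_eq_nil_iff.mpr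
      intro il hil
      obtain ⟨k, hk', rfl⟩ := (PySem.List.mem_enumerate_iff _ _ _).mp hil
      simpa using hfail _ (List.getElem_mem hk')
    simp only [hc]
    rw [hnil]
    simp

theorem pv_mainB (text : String) (phrases : List String) (window_size : Int) :
    get_context_batch_alt text phrases window_size
      = (PySem.List.dedup phrases).map (fun q => (q,
          ((PySem.List.enumerate (PySem.Str.splitlines text)).filter (fun il =>
              PySem.Str.isIn (PySem.Str.lower q) (PySem.Str.lower il.2))).map (fun il =>
            PySem.Str.join "\n"
              (PySem.List.slice (PySem.Str.splitlines text)
                (some (max 0 (il.1 - window_size)))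
                (some (min ((PySem.Str.splitlines text).length : Int) (il.1 + window_size + 1))))))) := by
  unfold get_context_batch_alt
  simp only []
  set lines := PySem.Str.splitlines text with hlines
  set win : Int → String := fun i =>
    PySem.Str.join "\n"
      (PySem.List.slice lines (some (max 0 (i - window_size)))
        (some (min (lines.length : Int) (i + window_size + 1)))) with hwin
  set init := phrases.foldl (fun st p =>
      match PySem.Chars.lower p.toList with
      | [] => (st.1, st.2 ++ [p])
      | c :: _ => (st.1.modify c [] (· ++ [(PySem.Chars.lower p.toList, p)]), st.2))
      ((PySem.Dict.empty : PySem.Dict Char (List (List Char × String))), ([] : List String)) with hinit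
  set H : Int × String → List String :=
    fun il => pvLineHits (PySem.Chars.lower il.2.toList) init.1 init.2 with hH
  have hHmem : ∀ il q, q ∈ H il ↔
      q ∈ phrases ∧ PySem.Chars.isIn (PySem.Chars.lower q.toList) (PySem.Chars.lower il.2.toList) = true :=
    fun il q => pv_hits_iff phrases (PySem.Chars.lower il.2.toList) q
  have hHnd : ∀ il, (H il).Nodup := fun il =>
    pv_scan_nodup _ _ _ _ (PySem.Set.nodup_ofList _)
  set d0 := phrases.foldl (fun d p => d.insert p ([] : List Int)) PySem.Dict.empty with hd0
  have hkeys0 : d0.keys = PySem.List.dedup phrases := pv_init_keys' phrases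
  have hg0 : ∀ q, d0.getD q [] = [] :=
    pv_init_getD' phrases PySem.Dict.empty (fun q => PySem.Dict.getD_empty q [])
  obtain ⟨hk, hg⟩ := pv_outerB H hHnd phrases (fun il q hq => ((hHmem il q).mp hq).1)
    (PySem.List.enumerate lines) d0
    (by intro p hp; rw [hkeys0]; exact (PySem.List.mem_dedup _ _).mpr hp)
  set matched := (PySem.List.enumerate lines).foldl (fun d il =>
      (H il).foldl (fun d p => d.modify p [] (· ++ [il.1])) d) d0 with hmatched
  rw [pv_comp_items (fun p => (matched.getD p []).map win) phrases]
  apply List.map_congr_left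
  intro q hq
  have hqm : q ∈ phrases := (PySem.List.mem_dedup _ _).mp hq
  refine Prod.ext rfl ?_
  simp only []
  rw [hg q, hg0 q, List.nil_append]
  have hfc : List.filter (fun il => decide (q ∈ H il)) (PySem.List.enumerate lines)
      = List.filter (fun il => PySem.Str.isIn (PySem.Str.lower q) (PySem.Str.lower il.2))
          (PySem.List.enumerate lines) := by
    apply List.filter_congr
    intro il _
    rw [Bool.eq_iff_iff, decide_eq_true_iff, hHmem il q]
    constructor
    · rintro ⟨_, h⟩
      simpa [PySem.Str.isIn, PySem.Str.lower] using h
    · intro h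
      exact ⟨hqm, by simpa [PySem.Str.isIn, PySem.Str.lower] using h⟩
  rw [hfc, List.map_map]
  rfl

-- ===== VERDICT (by name: the statement is the Claim_ definition above) =====
theorem get_context_batch_spec : Claim_equal_get_context_batch := by
  intro text phrases window_size _ hpre
  unfold Spec_get_context_batch
  rw [pv_mainA text phrases window_size hpre, pv_mainB]
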